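-- pv_equiv track=rewrite | github.com/NyxAether/advent2023_nyxhemera | advent2023/aoc2/utils.py | possible_max
-- ===== SOURCE A (Python) =====
-- def possible_max(game: tuple[int, tuple[str]]) -> int:
--     """
--     Given a game tuple containing an identifier and a list of draws,
--     this function determines if the maximum number drawn for each color
--     (red, green, blue) is within the specified limits. If all the maximum
--     numbers are within the limits, it returns the game identifier; otherwise,
--     it returns None.
--
--     Parameters:
--     - game: A tuple containing an identifier (int) and a list of draws (tuple[str]).
--
--     Returns:
--     - int: The game identifier if the maximum numbers are within the limits,
--       otherwise None.
--     """
--     max_draw = {"red": 0, "blue": 0, "green": 0}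
--     game_id, draws = game
--     for draw in draws:
--         number, color = draw.split(" ")
--         if max_draw[color] < int(number):
--             max_draw[color] = int(number)
--
--     if max_draw["red"] <= 12 and max_draw["green"] <= 13 and max_draw["blue"] <= 14:
--         return game_id
--     else:
--         return None
-- ===== SOURCE B (Python) =====
-- def possible_max(game: tuple[int, tuple[str]]) -> int:
--     limits = {"red": 12, "green": 13, "blue": 14}
--     game_id, draws = game
--     for draw in draws:
--         number, color = draw.split(" ")
--         if int(number) > limits[color]:
--             return None
--     return game_id
-- ===== Notes on version B (the rewrite author's own statement) =====
-- stated objective: simpler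
-- what changed: B replaces A's max-accumulator dict and post-loop three-way comparison with a limits table and a per-draw threshold check that returns None at the first violation.
import Mathlib
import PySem

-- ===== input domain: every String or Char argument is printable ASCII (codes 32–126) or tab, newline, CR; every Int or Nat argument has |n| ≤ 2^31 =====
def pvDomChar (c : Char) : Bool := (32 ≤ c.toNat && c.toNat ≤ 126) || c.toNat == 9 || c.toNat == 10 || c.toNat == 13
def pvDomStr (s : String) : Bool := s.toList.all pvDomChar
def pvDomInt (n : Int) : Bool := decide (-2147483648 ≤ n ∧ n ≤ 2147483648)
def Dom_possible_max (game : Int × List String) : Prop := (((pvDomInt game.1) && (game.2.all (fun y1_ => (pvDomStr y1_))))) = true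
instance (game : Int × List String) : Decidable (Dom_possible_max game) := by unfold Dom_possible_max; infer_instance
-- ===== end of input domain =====

-- B replaces A's max-accumulator dict and post-loop three-way comparison with a limits table
-- and a per-draw threshold check that returns None at the first violation (objective: simpler).

-- ===== PORT A =====
-- A's for-loop: update the max_draw dict; none = the loop raised (bad split / int() / unknown color).
def pmLoopA : List String → PySem.Dict String Int → Option (PySem.Dict String Int)
  | [], d => some d
  | s :: rest, d =>
    match PySem.Str.split? s " " with
    | some [number, color] =>
      match PySem.Int.ofStr? number, d.get? color with
      | some num, some cur =>
          pmLoopA rest (if cur < num then d.insert color num else d)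
      | _, _ => none
    | _ => none

def possible_max (game : Int × List String) : Option Int :=
  let max_draw : PySem.Dict String Int := PySem.Dict.ofList [("red", 0), ("blue", 0), ("green", 0)]
  match pmLoopA game.2 max_draw with
  | none => none
  | some d =>
    if d.getD "red" 0 ≤ 12 ∧ d.getD "green" 0 ≤ 13 ∧ d.getD "blue" 0 ≤ 14 then
      some game.1
    else
      none

-- ===== PORT B =====
def pmLimits : PySem.Dict String Int := PySem.Dict.ofList [("red", 12), ("green", 13), ("blue", 14)]

-- B's loop: short-circuit to None at the first draw exceeding its limit; skips when the loop raised.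
def pmLoopB (game_id : Int) : List String → Option (Option Int)
  | [] => some (some game_id)
  | s :: rest =>
    match PySem.Str.split? s " " with
    | some [number, color] =>
      match PySem.Int.ofStr? number, pmLimits.get? color with
      | some num, some lim =>
          if lim < num then some none else pmLoopB game_id rest
      | _, _ => none
    | _ => none

def possible_max_alt (game : Int × List String) : Option Int :=
  match pmLoopB game.1 game.2 with
  | some r => r
  | none => none

-- ===== PRECONDITION & SPEC =====
-- Pre_ excludes exactly the inputs where A raises: a draw that does not split into exactly
-- two pieces on " " (ValueError), a non-int count (ValueError), or an unknown color (KeyError).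
def pmDrawOK (s : String) : Bool :=
  match PySem.Str.split? s " " with
  | some [number, color] =>
      (PySem.Int.ofStr? number).isSome &&
        (color == "red" || color == "green" || color == "blue")
  | _ => false

def Pre_possible_max (game : Int × List String) : Prop :=
  ∀ s ∈ game.2, pmDrawOK s = true
instance (game : Int × List String) : Decidable (Pre_possible_max game) := by
  unfold Pre_possible_max; infer_instance

def pvWitness_possible_max : (Int × List String) := (7, ["3 red", "13 green", "14 blue"])

def Spec_possible_max (game : Int × List String) (out : Option Int) : Prop := out = possible_max_alt game
instance (game : Int × List String) (out : Option Int) : Decidable (Spec_possible_max game out) := by unfold Spec_possible_max; infer_instance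

-- ===== CLAIM (what is proved, stated in full; the proofs are below) =====
def Claim_equal_possible_max : Prop := ∀ (game : Int × List String), Dom_possible_max game → Pre_possible_max game → Spec_possible_max game (possible_max game)

-- ===== LEMMAS AND PROOFS =====

-- The key invariant: on well-formed draws, A's loop-then-compare equals B's short-circuit
-- scan, for any accumulator dict whose red/green/blue entries are r, g, b.
theorem pm_loop_eq (gid : Int) (draws : List String)
    (h : ∀ s ∈ draws, pmDrawOK s = true)
    (d : PySem.Dict String Int) (r g b : Int)
    (hr : d.get? "red" = some r) (hg : d.get? "green" = some g) (hb : d.get? "blue" = some b) :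
    (match pmLoopA draws d with
     | none => none
     | some d' =>
       if d'.getD "red" 0 ≤ 12 ∧ d'.getD "green" 0 ≤ 13 ∧ d'.getD "blue" 0 ≤ 14 then
         some gid
       else (none : Option Int)) =
    (if r ≤ 12 ∧ g ≤ 13 ∧ b ≤ 14 then
       (match pmLoopB gid draws with | some res => res | none => none)
     else none) := by
  induction draws generalizing d r g b with
  | nil =>
      simp [pmLoopA, pmLoopB, PySem.Dict.getD_eq_get?_getD, hr, hg, hb, Option.getD]
  | cons s rest ih =>
      have hs := h s (List.mem_cons_self ..)
      have hrest : ∀ t ∈ rest, pmDrawOK t = true := fun t ht => h t (List.mem_cons_of_mem _ ht)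
      unfold pmDrawOK at hs
      unfold pmLoopA pmLoopB
      cases hsplit : PySem.Str.split? s " " with
      | none => rw [hsplit] at hs; simp at hs
      | some parts =>
        rw [hsplit] at hs
        match parts with
        | [] => simp at hs
        | [x] => simp at hs
        | x :: y :: z :: t => simp at hs
        | [number, color] =>
          simp only [Bool.and_eq_true, Bool.or_eq_true, beq_iff_eq, Option.isSome_iff_exists] at hs
          obtain ⟨⟨num, hnum⟩, hcol⟩ := hs
          -- color is one of the three keys
          rcases hcol with (hc | hc) | hc <;> subst hc
          · -- red
            have hlim : pmLimits.get? "red" = some 12 := by decide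
            simp only [hnum, hr, hlim]
            by_cases hlt : r < num
            · rw [if_pos hlt]
              rw [ih hrest _ num g b (PySem.Dict.get?_insert_self ..)
                    (by rw [PySem.Dict.get?_insert_of_ne _ _ (by decide)]; exact hg)
                    (by rw [PySem.Dict.get?_insert_of_ne _ _ (by decide)]; exact hb)]
              by_cases h12 : (12:Int) < num
              · have : ¬ (num ≤ 12 ∧ g ≤ 13 ∧ b ≤ 14) := by omega
                rw [if_neg this, if_pos h12]
                split_ifs <;> rfl
              · have : ((num ≤ 12 ∧ g ≤ 13 ∧ b ≤ 14) ↔ (r ≤ 12 ∧ g ≤ 13 ∧ b ≤ 14)) := by omega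
                rw [if_neg h12]
                split_ifs with h1 h2 h2 <;> first | rfl | (exfalso; omega)
            · rw [if_neg hlt, ih hrest _ r g b hr hg hb]
              by_cases h12 : (12:Int) < num
              · have : ¬ (r ≤ 12 ∧ g ≤ 13 ∧ b ≤ 14) := by omega
                rw [if_neg this, if_neg this]
              · rw [if_neg h12]
          · -- green
            have hlim : pmLimits.get? "green" = some 13 := by decide
            simp only [hnum, hg, hlim]
            by_cases hlt : g < num
            · rw [if_pos hlt]
              rw [ih hrest _ r num b
                    (by rw [PySem.Dict.get?_insert_of_ne _ _ (by decide)]; exact hr)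
                    (PySem.Dict.get?_insert_self ..)
                    (by rw [PySem.Dict.get?_insert_of_ne _ _ (by decide)]; exact hb)]
              by_cases h13 : (13:Int) < num
              · have : ¬ (r ≤ 12 ∧ num ≤ 13 ∧ b ≤ 14) := by omega
                rw [if_neg this, if_pos h13]
                split_ifs <;> rfl
              · rw [if_neg h13]
                split_ifs with h1 h2 h2 <;> first | rfl | (exfalso; omega)
            · rw [if_neg hlt, ih hrest _ r g b hr hg hb]
              by_cases h13 : (13:Int) < num
              · have : ¬ (r ≤ 12 ∧ g ≤ 13 ∧ b ≤ 14) := by omega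
                rw [if_neg this, if_neg this]
              · rw [if_neg h13]
          · -- blue
            have hlim : pmLimits.get? "blue" = some 14 := by decide
            simp only [hnum, hb, hlim]
            by_cases hlt : b < num
            · rw [if_pos hlt]
              rw [ih hrest _ r g num
                    (by rw [PySem.Dict.get?_insert_of_ne _ _ (by decide)]; exact hr)
                    (by rw [PySem.Dict.get?_insert_of_ne _ _ (by decide)]; exact hg)
                    (PySem.Dict.get?_insert_self ..)]
              by_cases h14 : (14:Int) < num
              · have : ¬ (r ≤ 12 ∧ g ≤ 13 ∧ num ≤ 14) := by omega
                rw [if_neg this, if_pos h14]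
                split_ifs <;> rfl
              · rw [if_neg h14]
                split_ifs with h1 h2 h2 <;> first | rfl | (exfalso; omega)
            · rw [if_neg hlt, ih hrest _ r g b hr hg hb]
              by_cases h14 : (14:Int) < num
              · have : ¬ (r ≤ 12 ∧ g ≤ 13 ∧ b ≤ 14) := by omega
                rw [if_neg this, if_neg this]
              · rw [if_neg h14]

-- ===== VERDICT (by name: the statement is the Claim_ definition above) =====
theorem possible_max_spec : Claim_equal_possible_max := by
  intro game _hdom hpre
  unfold Spec_possible_max possible_max possible_max_alt
  exact pm_loop_eq game.1 game.2 hpre _ 0 0 0 (by decide) (by decide) (by decide)
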